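-- pv_equiv track=rewrite | github.com/mmistroni/Codility | src/frog_river_one.py | _loop
-- ===== SOURCE A (Python) =====
-- def _loop(X, A, checks, idx):
--     if not A:
--         return -1
--     item = A[0]
--     if item in checks:
--         checks.remove(item)
--     if not checks:
--         return idx
--     return _loop(X, A[1:], checks, idx+1)
-- ===== SOURCE B (Python) =====
-- def _loop(X, A, checks, idx):
--     for i, item in enumerate(A):
--         if item in checks:
--             checks.remove(item)
--         if not checks:
--             return idx + i
--     return -1
-- ===== Notes on version B (the rewrite author's own statement) =====
-- stated objective: faster
-- what changed: Replaced the self-recursive helper, which copies A[1:] at every step, with a single iterative enumerate loop that returns idx+i on success and -1 after the loop, removing the O(n^2) slicing.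
import Mathlib
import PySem

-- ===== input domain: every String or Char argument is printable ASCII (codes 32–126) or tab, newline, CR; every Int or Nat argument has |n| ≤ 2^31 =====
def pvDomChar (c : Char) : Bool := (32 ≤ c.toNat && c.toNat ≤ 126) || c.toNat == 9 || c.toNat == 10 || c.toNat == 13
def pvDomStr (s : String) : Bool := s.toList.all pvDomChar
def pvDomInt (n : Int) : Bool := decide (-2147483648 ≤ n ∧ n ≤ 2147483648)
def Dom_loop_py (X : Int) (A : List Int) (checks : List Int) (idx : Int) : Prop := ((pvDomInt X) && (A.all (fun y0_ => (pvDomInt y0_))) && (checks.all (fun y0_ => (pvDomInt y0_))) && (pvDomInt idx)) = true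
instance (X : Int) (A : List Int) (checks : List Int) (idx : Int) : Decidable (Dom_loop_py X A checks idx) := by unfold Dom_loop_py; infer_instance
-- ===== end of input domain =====

-- B replaces A's self-recursion over A[1:] with one iterative pass over enumerate(A) returning idx+i;
-- equivalence is about the return value (both mutate `checks` the same way in Python).

-- ===== PORT A =====
def loop_py (X : Int) (A : List Int) (checks : List Int) (idx : Int) : Int :=
  match A with
  | [] => -1
  | item :: rest =>
    -- `if item in checks: checks.remove(item)` : first occurrence removed when present
    let checks1 := if checks.contains item then (PySem.List.remove? checks item).getD checks else checks
    if checks1.isEmpty then idx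
    else loop_py X rest checks1 (idx + 1)

-- ===== PORT B =====
-- the `for i, item in enumerate(A)` loop body; returns the i of the early return, none if the loop falls through
def pvScan (checks : List Int) (ps : List (Int × Int)) : Option Int :=
  match ps with
  | [] => none
  | (i, item) :: rest =>
    let checks1 := if checks.contains item then (PySem.List.remove? checks item).getD checks else checks
    if checks1.isEmpty then some i
    else pvScan checks1 rest

def loop_py_alt (X : Int) (A : List Int) (checks : List Int) (idx : Int) : Int :=
  match pvScan checks (PySem.List.enumerate A 0) with
  | some i => idx + i
  | none => -1

-- ===== CLAIM (what is proved, stated in full; the proofs are below) =====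
def Spec_loop_py (X : Int) (A : List Int) (checks : List Int) (idx : Int) (out : Int) : Prop := out = loop_py_alt X A checks idx
instance (X : Int) (A : List Int) (checks : List Int) (idx : Int) (out : Int) : Decidable (Spec_loop_py X A checks idx out) := by unfold Spec_loop_py; infer_instance

def Claim_equal_loop_py : Prop := ∀ (X : Int) (A : List Int) (checks : List Int) (idx : Int), Dom_loop_py X A checks idx → Spec_loop_py X A checks idx (loop_py X A checks idx)

-- ===== LEMMAS AND PROOFS =====
theorem pv_key (X : Int) (A : List Int) : ∀ (checks : List Int) (idx s : Int),
    loop_py X A checks idx =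
      match pvScan checks (PySem.List.enumerate A s) with
      | some i => idx - s + i
      | none => -1 := by
  induction A with
  | nil => intro checks idx s; simp [loop_py, PySem.List.enumerate_nil, pvScan]
  | cons item rest ih =>
    intro checks idx s
    rw [PySem.List.enumerate_cons]
    simp only [loop_py, pvScan]
    by_cases h : (if checks.contains item then (PySem.List.remove? checks item).getD checks else checks).isEmpty
    · simp only [h, if_true]; ring
    · simp only [h, Bool.false_eq_true, if_false]
      rw [ih _ (idx + 1) (s + 1)]
      cases pvScan (if checks.contains item then (PySem.List.remove? checks item).getD checks else checks) (PySem.List.enumerate rest (s + 1)) with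
      | none => rfl
      | some i => simp only []; ring

-- ===== VERDICT (by name: the statement is the Claim_ definition above) =====
theorem loop_py_spec : Claim_equal_loop_py := by
  intro X A checks idx _
  unfold Spec_loop_py loop_py_alt
  rw [pv_key X A checks idx 0]
  cases pvScan checks (PySem.List.enumerate A 0) with
  | none => rfl
  | some i => simp
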